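-- pv_equiv track=rewrite | github.com/pypi-data/pypi-mirror-385 | packages/leanclient/leanclient-0.2.1.tar.gz/leanclient-0.2.1/leanclient/utils.py | _index_from_line_character
-- ===== SOURCE A (Python) =====
-- def _index_from_line_character(text: str, line: int, character: int) -> int:
--     if line < 0:
--         return 0
--
--     lines = text.split("\n")
--     if line >= len(lines):
--         return len(text)
--
--     prefix = sum(len(lines[i]) + 1 for i in range(line))
--     return prefix + max(character, 0)
-- ===== SOURCE B (Python) =====
-- def _index_from_line_character(text: str, line: int, character: int) -> int:
--     if line < 0:
--         return 0
--     idx = -1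
--     for _ in range(line):
--         idx = text.find("\n", idx + 1)
--         if idx == -1:
--             return len(text)
--     return idx + 1 + max(character, 0)
-- ===== Notes on version B (the rewrite author's own statement) =====
-- stated objective: alternative
-- what changed: Instead of splitting the whole text on '\n' and prefix-summing line lengths, B walks the text with repeated find('\n', pos+1), tracking only the last newline index, and returns early with len(text) when a find fails.
import Mathlib
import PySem

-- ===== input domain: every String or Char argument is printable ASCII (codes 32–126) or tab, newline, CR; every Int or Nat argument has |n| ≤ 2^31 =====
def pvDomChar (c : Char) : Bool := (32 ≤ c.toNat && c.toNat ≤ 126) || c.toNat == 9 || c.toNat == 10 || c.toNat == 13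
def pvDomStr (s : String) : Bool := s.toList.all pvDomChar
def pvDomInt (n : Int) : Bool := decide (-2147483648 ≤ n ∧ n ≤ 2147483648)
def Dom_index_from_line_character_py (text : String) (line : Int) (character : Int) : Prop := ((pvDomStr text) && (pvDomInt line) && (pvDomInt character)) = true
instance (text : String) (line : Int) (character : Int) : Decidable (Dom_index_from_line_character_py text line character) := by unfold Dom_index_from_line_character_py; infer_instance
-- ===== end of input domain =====

-- B replaces A's split-the-whole-text-and-prefix-sum by a find('\n', pos+1) loop that only
-- tracks the last newline index (objective: alternative traversal, no list of lines built).

-- ===== PORT A =====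
-- text.split("\n"): the separator is the non-empty literal "\n", so Python's split is
-- exactly PySem.Chars.splitOn on the character list (PySem.Chars.split? = some (splitOn …)).
def index_from_line_character_py (text : String) (line : Int) (character : Int) : Int :=
  if line < 0 then 0
  else
    let lines := PySem.Chars.splitOn text.toList ['\n']
    if line ≥ (lines.length : Int) then PySem.Str.len text
    else
      let prefix_ := (PySem.List.pyRange 0 line 1).foldl
        (fun acc i => acc + ((PySem.List.pyGetD lines i []).length : Int) + 1) 0
      prefix_ + max character 0

-- ===== PORT B =====
-- the 'for _ in range(line)' loop of Source B; the early 'return len(text)' is the 'none' outcome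
def pvFindLoop (cs : List Char) (idx : Int) : Nat → Option Int
  | 0 => some idx
  | n + 1 =>
    let j := PySem.Chars.findFrom cs ['\n'] (idx + 1) none
    if j = -1 then none else pvFindLoop cs j n

def index_from_line_character_py_alt (text : String) (line : Int) (character : Int) : Int :=
  if line < 0 then 0
  else
    match pvFindLoop text.toList (-1) line.toNat with
    | none => PySem.Str.len text
    | some idx => idx + 1 + max character 0

-- ===== PRECONDITION & SPEC =====
def Spec_index_from_line_character_py (text : String) (line : Int) (character : Int) (out : Int) : Prop := out = index_from_line_character_py_alt text line character
instance (text : String) (line : Int) (character : Int) (out : Int) : Decidable (Spec_index_from_line_character_py text line character out) := by unfold Spec_index_from_line_character_py; infer_instance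

-- ===== CLAIM (what is proved, stated in full; the proofs are below) =====
def Claim_equal_index_from_line_character_py : Prop := ∀ (text : String) (line : Int) (character : Int), Dom_index_from_line_character_py text line character → Spec_index_from_line_character_py text line character (index_from_line_character_py text line character)

-- ===== LEMMAS AND PROOFS =====

-- reference splitter: mySplit pre cs prepends pre to the first piece of cs split on '\n'
def mySplit (pre : List Char) : List Char → List (List Char)
  | [] => [pre]
  | c :: rest => if c = '\n' then pre :: mySplit [] rest else mySplit (pre ++ [c]) rest

-- index of the first '\n' (or -1), structurally
def firstNL : List Char → Int
  | [] => -1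
  | c :: t => if c = '\n' then 0 else (if firstNL t = -1 then -1 else firstNL t + 1)

-- start offset of line n (none if the text has fewer than n newlines)
def gOff (cs : List Char) : Nat → Option Int
  | 0 => some 0
  | n + 1 =>
    match cs with
    | [] => none
    | c :: rest =>
      if c = '\n' then (gOff rest n).map (· + 1)
      else (gOff rest (n + 1)).map (· + 1)

def sumLens (parts : List (List Char)) : Int := (parts.map (fun p => (p.length : Int) + 1)).sum

lemma splitOn_go_spec : ∀ (fuel : Nat) (l cur : List Char) (acc : List (List Char)),
    l.length < fuel →
    PySem.Chars.splitOn.go ['\n'] fuel l cur acc = acc.reverse ++ mySplit cur.reverse l := by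
  intro fuel
  induction fuel with
  | zero => intro l cur acc h; omega
  | succ n ih =>
    intro l cur acc h
    cases l with
    | nil => simp [PySem.Chars.splitOn.go, mySplit]
    | cons c rest =>
      rw [PySem.Chars.splitOn.go]
      by_cases hc : c = '\n'
      · subst hc
        have hp : List.isPrefixOf ['\n'] ('\n' :: rest) = true := by
          simp [List.isPrefixOf]
        simp only [hp, if_pos, List.length_cons, List.drop_succ_cons, List.length_nil, List.drop_zero]
        rw [ih rest [] ((cur.reverse) :: acc) (by simp at h ⊢; omega)]
        simp [mySplit]
      · have hp : List.isPrefixOf ['\n'] (c :: rest) = false := by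
          simp [List.isPrefixOf]; exact fun hcontra => (hc hcontra.symm).elim
        simp only [hp, Bool.false_eq_true, if_false]
        rw [ih rest (c :: cur) acc (by simp at h ⊢; omega)]
        simp [mySplit, hc]

lemma splitOn_eq_mySplit (cs : List Char) :
    PySem.Chars.splitOn cs ['\n'] = mySplit [] cs := by
  rw [PySem.Chars.splitOn, splitOn_go_spec (cs.length + 1) cs [] [] (by omega)]
  simp

lemma find_go_shift : ∀ (l : List Char) (k : Nat),
    PySem.Chars.find.go ['\n'] l k =
      if PySem.Chars.find.go ['\n'] l 0 = -1 then -1 else PySem.Chars.find.go ['\n'] l 0 + k := by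
  intro l
  induction l with
  | nil => intro k; simp [PySem.Chars.find.go, List.isEmpty]
  | cons c t ih =>
    intro k
    rw [PySem.Chars.find.go, PySem.Chars.find.go]
    by_cases hc : c = '\n'
    · subst hc
      have hp : List.isPrefixOf ['\n'] ('\n' :: t) = true := by simp [List.isPrefixOf]
      simp [hp]
    · have hp : List.isPrefixOf ['\n'] (c :: t) = false := by
        simp [List.isPrefixOf]; exact fun hcontra => (hc hcontra.symm).elim
      simp only [hp, Bool.false_eq_true, if_false]
      rw [ih (k + 1), ih 1]
      have hb : -1 ≤ PySem.Chars.find.go ['\n'] t 0 := PySem.Chars.neg_one_le_find t ['\n']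
      split_ifs with h1 h2 <;> push_cast <;> omega

lemma find_eq_firstNL (cs : List Char) : PySem.Chars.find cs ['\n'] = firstNL cs := by
  induction cs with
  | nil => simp [PySem.Chars.find, PySem.Chars.find.go, firstNL, List.isEmpty]
  | cons c t ih =>
    rw [PySem.Chars.find] at ih ⊢
    rw [PySem.Chars.find.go]
    by_cases hc : c = '\n'
    · subst hc
      have hp : List.isPrefixOf ['\n'] ('\n' :: t) = true := by simp [List.isPrefixOf]
      simp [hp, firstNL]
    · have hp : List.isPrefixOf ['\n'] (c :: t) = false := by
        simp [List.isPrefixOf]; exact fun hcontra => (hc hcontra.symm).elim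
      simp only [hp, Bool.false_eq_true, if_false]
      rw [find_go_shift t 1, ih]
      simp [firstNL, hc]

lemma firstNL_bounds (cs : List Char) :
    firstNL cs = -1 ∨ (0 ≤ firstNL cs ∧ firstNL cs < (cs.length : Int)) := by
  induction cs with
  | nil => left; rfl
  | cons c t ih =>
    by_cases hc : c = '\n'
    · right; simp [firstNL, hc]
    · rcases ih with h | h
      · left; simp [firstNL, hc, h]
      · right; simp [firstNL, hc]
        split_ifs with h1 <;> omega

lemma gOff_succ_eq : ∀ (cs : List Char) (n : Nat),
    gOff cs (n + 1) =
      (if firstNL cs = -1 then none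
       else (gOff (cs.drop ((firstNL cs).toNat + 1)) n).map (· + firstNL cs + 1)) := by
  intro cs
  induction cs with
  | nil => intro n; simp [gOff, firstNL]
  | cons c rest ih =>
    intro n
    by_cases hc : c = '\n'
    · subst hc
      simp [gOff, firstNL]
    · rw [gOff]
      simp only [if_neg hc]
      rw [ih n]
      rcases firstNL_bounds rest with h | h
      · simp [firstNL, hc, h]
      · have hne : ¬ firstNL rest = -1 := by omega
        have hne2 : ¬ firstNL (c :: rest) = -1 := by
          simp [firstNL, hc, hne]; omega
        rw [if_neg hne, if_neg hne2]
        have hfc : firstNL (c :: rest) = firstNL rest + 1 := by simp [firstNL, hc, hne]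
        rw [hfc]
        have htn : (firstNL rest + 1).toNat + 1 = ((firstNL rest).toNat + 1) + 1 := by omega
        rw [htn]
        simp only [List.drop_succ_cons]
        rw [Option.map_map]
        congr 1
        funext o
        simp; ring

lemma pvFindLoop_eq (n : Nat) : ∀ (cs : List Char) (k : Nat), k ≤ cs.length →
    pvFindLoop cs ((k : Int) - 1) n = (gOff (cs.drop k) n).map (fun o => (k : Int) + o - 1) := by
  induction n with
  | zero => intro cs k hk; simp [pvFindLoop, gOff]
  | succ n ih =>
    intro cs k hk
    rw [pvFindLoop]
    have harg : (k : Int) - 1 + 1 = (k : Int) := by ring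
    rw [harg]
    rw [PySem.Chars.findFrom_natCast cs ['\n'] k hk, find_eq_firstNL]
    rw [gOff_succ_eq]
    rcases firstNL_bounds (cs.drop k) with h | h
    · simp [h]
    · have hne : ¬ firstNL (cs.drop k) = -1 := by omega
      rw [if_neg hne, if_neg hne]
      set r := firstNL (cs.drop k) with hr
      have hlen : (cs.drop k).length = cs.length - k := by simp
      have hj : ¬ ((k : Int) + r = -1) := by omega
      rw [if_neg hj]
      have hk' : k + r.toNat + 1 ≤ cs.length := by omega
      have hcast : (k : Int) + r = ((k + r.toNat + 1 : Nat) : Int) - 1 := by push_cast; omega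
      rw [hcast, ih cs (k + r.toNat + 1) hk']
      have hdrop : cs.drop (k + r.toNat + 1) = (cs.drop k).drop (r.toNat + 1) := by
        rw [List.drop_drop]; ring_nf
      rw [hdrop, Option.map_map]
      congr 1
      funext o
      simp
      omega

lemma mySplit_pre : ∀ (cs pre : List Char), ∃ h t,
    mySplit [] cs = h :: t ∧ mySplit pre cs = (pre ++ h) :: t := by
  intro cs
  induction cs with
  | nil => intro pre; exact ⟨[], [], rfl, by simp [mySplit]⟩
  | cons c rest ih =>
    intro pre
    by_cases hc : c = '\n'
    · exact ⟨[], mySplit [] rest, by simp [mySplit, hc], by simp [mySplit, hc]⟩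
    · obtain ⟨h, t, h1, h2⟩ := ih [c]
      obtain ⟨h', t', h1', h2'⟩ := ih (pre ++ [c])
      rw [h1] at h1'
      injection h1' with e1 e2
      subst e1; subst e2
      refine ⟨c :: h, t, ?_, ?_⟩
      · simp [mySplit, hc, h2]
      · simp [mySplit, hc, h2']

lemma gOff_mySplit : ∀ (cs : List Char) (n : Nat),
    (gOff cs n = none → (mySplit [] cs).length ≤ n) ∧
    (∀ o, gOff cs n = some o → n < (mySplit [] cs).length ∧ o = sumLens ((mySplit [] cs).take n)) := by
  intro cs
  induction cs with
  | nil =>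
    intro n
    cases n with
    | zero =>
      refine ⟨by simp [gOff], fun o ho => ?_⟩
      simp [gOff] at ho; subst ho
      simp [mySplit, sumLens]
    | succ n => refine ⟨fun _ => by simp [mySplit], fun o ho => by simp [gOff] at ho⟩
  | cons c rest ih =>
    intro n
    cases n with
    | zero =>
      refine ⟨by simp [gOff], fun o ho => ?_⟩
      simp [gOff] at ho; subst ho
      obtain ⟨h, t, h1, _⟩ := mySplit_pre (c :: rest) []
      simp [h1, sumLens]
    | succ n =>
      by_cases hc : c = '\n'
      · subst hc
        have hsplit : mySplit [] ('\n' :: rest) = [] :: mySplit [] rest := by simp [mySplit]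
        constructor
        · intro hnone
          simp only [gOff, if_true] at hnone
          rw [Option.map_eq_none_iff] at hnone
          have := (ih n).1 hnone
          simp [hsplit]; omega
        · intro o ho
          simp only [gOff, if_true] at ho
          rw [Option.map_eq_some_iff] at ho
          obtain ⟨o', ho', rfl⟩ := ho
          obtain ⟨hlt, hsum⟩ := (ih n).2 o' ho'
          refine ⟨by simp [hsplit]; omega, ?_⟩
          rw [hsplit]
          simp [sumLens] at hsum ⊢
          omega
      · obtain ⟨h, t, h1, h2⟩ := mySplit_pre rest [c]
        have hsplit : mySplit [] (c :: rest) = (c :: h) :: t := by simp [mySplit, hc, h2]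
        constructor
        · intro hnone
          simp only [gOff, if_neg hc] at hnone
          rw [Option.map_eq_none_iff] at hnone
          have := (ih (n + 1)).1 hnone
          rw [h1] at this
          simp [hsplit]; simp at this; omega
        · intro o ho
          simp only [gOff, if_neg hc] at ho
          rw [Option.map_eq_some_iff] at ho
          obtain ⟨o', ho', rfl⟩ := ho
          obtain ⟨hlt, hsum⟩ := (ih (n + 1)).2 o' ho'
          rw [h1] at hlt hsum
          refine ⟨by simp [hsplit]; simp at hlt; omega, ?_⟩
          rw [hsplit]
          simp [sumLens] at hsum ⊢
          omega

lemma prefix_sum_eq (lines : List (List Char)) : ∀ (n : Nat), n ≤ lines.length →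
    (PySem.List.pyRange 0 (n : Int) 1).foldl
      (fun acc i => acc + ((PySem.List.pyGetD lines i []).length : Int) + 1) 0
      = sumLens (lines.take n) := by
  intro n
  induction n with
  | zero => intro _; simp [PySem.List.pyRange, sumLens]
  | succ n ih =>
    intro hn
    have hs : PySem.List.pyRange 0 ((n : Int) + 1) 1
        = PySem.List.pyRange 0 (n : Int) 1 ++ PySem.List.pyRange (n : Int) ((n : Int) + 1) 1 :=
      PySem.List.pyRange_one_append 0 n ((n : Int) + 1) (by omega) (by omega)
    have hone : PySem.List.pyRange (n : Int) ((n : Int) + 1) 1 = [(n : Int)] := by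
      rw [PySem.List.pyRange_one_cons (show (n : Int) < (n : Int) + 1 by omega)]
      congr 1
      have : ((PySem.List.pyRange ((n : Int) + 1) ((n : Int) + 1) 1).length : Int) = 0 := by
        rw [PySem.List.length_pyRange_one]; omega
      exact List.length_eq_zero_iff.mp (by exact_mod_cast this)
    push_cast
    rw [hs, hone, List.foldl_append]
    rw [ih (by omega)]
    simp only [List.foldl_cons, List.foldl_nil]
    rw [PySem.List.pyGetD_natCast]
    have hget : lines.getD n [] = lines[n]'(by omega) := List.getD_eq_getElem lines [] (by omega)
    rw [hget]
    have htake : lines.take (n + 1) = lines.take n ++ [lines[n]'(by omega)] := by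
      rw [List.take_add_one, List.getElem?_eq_getElem (show n < lines.length by omega)]
      rfl
    rw [htake]
    unfold sumLens
    rw [List.map_append, List.sum_append]
    simp only [List.map_take, List.map_cons, List.map_nil, List.sum_cons, List.sum_nil]
    ring

-- ===== VERDICT (by name: the statement is the Claim_ definition above) =====
theorem index_from_line_character_py_spec : Claim_equal_index_from_line_character_py := by
  intro text line character _
  unfold Spec_index_from_line_character_py index_from_line_character_py index_from_line_character_py_alt
  by_cases hl : line < 0
  · simp [hl]
  · simp only [if_neg hl]
    set cs := text.toList with hcs
    set n := line.toNat with hn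
    have hline : (n : Int) = line := Int.toNat_of_nonneg (by omega)
    have hloop : pvFindLoop cs (-1) n = (gOff cs n).map (fun o => (0 : Int) + o - 1) := by
      have := pvFindLoop_eq n cs 0 (by omega)
      simpa using this
    rw [splitOn_eq_mySplit]
    cases hg : gOff cs n with
    | none =>
      rw [hloop, hg]
      have hlen := (gOff_mySplit cs n).1 hg
      have : line ≥ ((mySplit [] cs).length : Int) := by omega
      simp [this]
    | some o =>
      rw [hloop, hg]
      obtain ⟨hlt, hsum⟩ := (gOff_mySplit cs n).2 o hg
      have hguard : ¬ (line ≥ ((mySplit [] cs).length : Int)) := by omega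
      rw [if_neg hguard]
      have hpr := prefix_sum_eq (mySplit [] cs) n (by omega)
      rw [hline] at hpr
      rw [hpr, hsum]
      simp only [Option.map_some]
      ring
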